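-- pv_equiv track=rewrite | github.com/Marin260/adventOfCode | py/2023/day7/day7.py | cardOccur
-- ===== SOURCE A (Python) =====
-- def cardOccur(hand, joker=False):
--     occ = []
--     jokers = 0
--     for card in set(hand):
--         if joker:
--             if card == "J":
--                 jokers += hand.count(card)
--             else:
--                 occ.append(hand.count(card))
--         else:
--             occ.append(hand.count(card))
--     occ.sort(reverse=True)
--     if joker:
--         if len(occ) > 0:
--             occ[0] += jokers
--         else:
--             occ = [jokers]
--     return occ
-- ===== SOURCE B (Python) =====
-- def cardOccur(hand, joker=False):
--     s = sorted(hand)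
--     occ = []
--     jokers = 0
--     i = 0
--     while i < len(s):
--         j = i
--         while j < len(s) and s[j] == s[i]:
--             j += 1
--         if joker and s[i] == "J":
--             jokers = j - i
--         else:
--             occ.append(j - i)
--         i = j
--     occ.sort(reverse=True)
--     if joker:
--         if occ:
--             occ[0] += jokers
--         else:
--             occ = [jokers]
--     return occ
-- ===== Notes on version B (the rewrite author's own statement) =====
-- stated objective: alternative
-- what changed: B sorts the hand once and scans runs of equal cards to get the counts (sort-then-group), instead of A's scan of hand.count(card) over set(hand).
import Mathlib
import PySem

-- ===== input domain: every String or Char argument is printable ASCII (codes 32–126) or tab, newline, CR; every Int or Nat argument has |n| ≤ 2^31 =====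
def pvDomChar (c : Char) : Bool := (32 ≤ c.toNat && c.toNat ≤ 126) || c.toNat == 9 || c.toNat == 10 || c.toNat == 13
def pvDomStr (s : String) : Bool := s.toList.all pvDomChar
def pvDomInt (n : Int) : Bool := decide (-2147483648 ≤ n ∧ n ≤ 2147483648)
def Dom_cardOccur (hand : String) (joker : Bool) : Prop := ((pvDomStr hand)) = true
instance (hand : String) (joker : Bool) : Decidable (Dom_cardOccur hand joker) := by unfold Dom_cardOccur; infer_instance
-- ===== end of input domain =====

-- B sorts the hand once and groups runs of equal cards instead of A's hand.count(card) scan over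
-- set(hand); an alternative decomposition with the same results (including [jokers] on empty or
-- all-joker hands).

-- ===== PORT A =====
def cardOccur (hand : String) (joker : Bool) : List Int :=
  -- 'for card in set(hand)' with the two accumulators occ and jokers; the final sorted result
  -- does not depend on the set's iteration order
  let st := (PySem.Set.ofList hand.toList).foldl (fun (st : List Int × Int) card =>
      if joker then
        if card == 'J' then (st.1, st.2 + (PySem.Chars.count hand.toList [card] : Int))
        else (st.1 ++ [(PySem.Chars.count hand.toList [card] : Int)], st.2)
      else (st.1 ++ [(PySem.Chars.count hand.toList [card] : Int)], st.2)) ([], 0)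
  let occ := PySem.List.sorted st.1 (fun x => x) true
  if joker then
    if occ.length > 0 then (occ.headD 0 + st.2) :: occ.tail   -- occ[0] += jokers
    else [st.2]
  else occ

-- ===== PORT B =====
-- the outer 'while i < len(s)' loop of Source B, carrying occ and jokers; the inner 'while' that
-- advances j over the run of s[i] is the takeWhile/dropWhile split of the remainder, and
-- n = j - i is the run length
def bLoop (joker : Bool) : Nat → List Char → List Int → Int → List Int × Int
  | _, [], occ, jokers => (occ, jokers)
  | 0, _ :: _, occ, jokers => (occ, jokers)   -- fuel guard only; never reached for fuel = length
  | fuel + 1, x :: xs, occ, jokers =>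
    let n : Int := 1 + (xs.takeWhile (fun c => c == x)).length
    if joker && x == 'J' then bLoop joker fuel (xs.dropWhile (fun c => c == x)) occ n
    else bLoop joker fuel (xs.dropWhile (fun c => c == x)) (occ ++ [n]) jokers

def cardOccur_alt (hand : String) (joker : Bool) : List Int :=
  let s := PySem.List.sorted hand.toList (fun x => x) false
  let st := bLoop joker s.length s [] 0
  let occ := PySem.List.sorted st.1 (fun x => x) true
  if joker then
    if occ.isEmpty then [st.2]
    else (occ.headD 0 + st.2) :: occ.tail   -- occ[0] += jokers
  else occ

-- ===== PRECONDITION & SPEC =====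
def Spec_cardOccur (hand : String) (joker : Bool) (out : List Int) : Prop := out = cardOccur_alt hand joker
instance (hand : String) (joker : Bool) (out : List Int) : Decidable (Spec_cardOccur hand joker out) := by unfold Spec_cardOccur; infer_instance

-- ===== CLAIM (what is proved, stated in full; the proofs are below) =====
def Claim_equal_cardOccur : Prop := ∀ (hand : String) (joker : Bool), Dom_cardOccur hand joker → Spec_cardOccur hand joker (cardOccur hand joker)

-- ===== LEMMAS AND PROOFS =====

-- str.count with a single-character needle is List.count
theorem count_go_singleton (c : Char) : ∀ (l : List Char) (fuel acc : Nat), l.length ≤ fuel →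
    PySem.Chars.count.go [c] fuel l acc = acc + l.count c := by
  intro l
  induction l with
  | nil => intro fuel acc _; cases fuel <;> simp [PySem.Chars.count.go]
  | cons h t ih =>
    intro fuel acc hf
    cases fuel with
    | zero => simp at hf
    | succ f =>
      have ht : t.length ≤ f := by simpa using hf
      by_cases hc : c = h
      · subst hc
        have hstep : PySem.Chars.count.go [c] (f + 1) (c :: t) acc =
            PySem.Chars.count.go [c] f t (acc + 1) := by
          simp [PySem.Chars.count.go, List.isPrefixOf]
        rw [hstep, ih f (acc + 1) ht, List.count_cons]
        simp
        omega
      · have hcb : (c == h) = false := by simpa using hc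
        have hstep : PySem.Chars.count.go [c] (f + 1) (h :: t) acc =
            PySem.Chars.count.go [c] f t acc := by
          simp [PySem.Chars.count.go, List.isPrefixOf, hcb]
        have hb : (h == c) = false := by simpa using fun e => hc e.symm
        rw [hstep, ih f acc ht, List.count_cons, hb]
        simp

theorem chars_count_singleton (l : List Char) (c : Char) :
    PySem.Chars.count l [c] = l.count c := by
  simp [PySem.Chars.count, count_go_singleton c l l.length 0 le_rfl]

-- the distinct values of a run-grouped scan, in order of appearance
def dedupKeys : List Char → List Char
  | [] => []
  | x :: xs => x :: dedupKeys (xs.dropWhile (fun c => c == x))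
  termination_by t => t.length
  decreasing_by
    simpa using Nat.lt_succ_of_le (List.length_dropWhile_le _ _)

-- on a sorted list the run at the head is exactly all occurrences of the head
theorem run_split : ∀ (x : Char) (xs : List Char), (x :: xs).Pairwise (· ≤ ·) →
    xs.takeWhile (fun c => c == x) = xs.filter (fun c => c == x) ∧
    xs.dropWhile (fun c => c == x) = xs.filter (fun c => !(c == x)) := by
  intro x xs
  induction xs with
  | nil => intro _; simp
  | cons y ys ih =>
    intro h
    rcases List.pairwise_cons.mp h with ⟨hx, hys⟩
    rcases List.pairwise_cons.mp hys with ⟨hy, hys'⟩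
    by_cases hxy : y = x
    · subst hxy
      have hIH := ih (List.pairwise_cons.mpr ⟨fun a ha => hx a (List.mem_cons_of_mem _ ha), hys'⟩)
      simp [hIH.1, hIH.2]
    · have hlt : x < y := lt_of_le_of_ne (hx y (List.mem_cons_self)) (fun e => hxy e.symm)
      have hnot : ∀ z ∈ y :: ys, ¬ (z = x) := by
        intro z hz e
        rcases List.mem_cons.mp hz with rfl | hz'
        · exact hxy e
        · exact absurd (e ▸ hy z hz') (not_le.mpr hlt)
      have hyb : (y == x) = false := by simpa using fun e => hxy e
      constructor
      · rw [List.takeWhile_cons_of_neg (by simp [hyb])]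
        rw [List.filter_cons_of_neg (by simp [hyb])]
        symm
        rw [List.filter_eq_nil_iff]
        intro z hz
        simpa using hnot z (List.mem_cons_of_mem _ hz)
      · rw [List.dropWhile_cons_of_neg (by simp [hyb])]
        symm
        rw [List.filter_eq_self]
        intro z hz
        simpa using hnot z hz

theorem mem_dedupKeys : ∀ (t : List Char) (c : Char), c ∈ dedupKeys t → c ∈ t := by
  intro t
  induction t using dedupKeys.induct with
  | case1 => intro c hc; simp [dedupKeys] at hc
  | case2 x xs ih =>
    intro c hc
    rw [dedupKeys] at hc
    rcases List.mem_cons.mp hc with rfl | hc'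
    · exact List.mem_cons_self
    · exact List.mem_cons_of_mem _ ((xs.dropWhile_sublist _).mem (ih c hc'))

-- the helper facts about the head run of a sorted list
theorem run_facts (x : Char) (xs : List Char) (h : (x :: xs).Pairwise (· ≤ ·)) :
    ((x :: xs).count x = 1 + (xs.takeWhile (fun c => c == x)).length) ∧
    (xs.dropWhile (fun c => c == x)).Pairwise (· ≤ ·) ∧
    x ∉ xs.dropWhile (fun c => c == x) ∧
    (∀ c, c ≠ x → (x :: xs).count c = (xs.dropWhile (fun c => c == x)).count c) ∧
    (∀ c, c ≠ x → (c ∈ x :: xs ↔ c ∈ xs.dropWhile (fun c => c == x))) := by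
  rcases run_split x xs h with ⟨htake, hdrop⟩
  have hxs : xs.Pairwise (· ≤ ·) := (List.pairwise_cons.mp h).2
  have hcount : ∀ c, c ≠ x → xs.count c = (xs.dropWhile (fun c => c == x)).count c := by
    intro c hc
    conv_lhs => rw [← List.takeWhile_append_dropWhile (p := fun c => c == x) (l := xs)]
    rw [List.count_append]
    have : (xs.takeWhile (fun c => c == x)).count c = 0 := by
      rw [List.count_eq_zero]
      intro hmem
      exact hc (by simpa using List.mem_takeWhile_imp hmem)
    omega
  refine ⟨?_, ?_, ?_, ?_, ?_⟩
  · rw [List.count_cons_self, htake, List.count_eq_length_filter]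
    omega
  · rw [hdrop]
    exact List.Pairwise.sublist List.filter_sublist hxs
  · rw [hdrop]; simp
  · intro c hc
    have hb : (x == c) = false := by simpa using fun e => hc e.symm
    rw [List.count_cons, hb, hcount c hc]
    simp
  · intro c hc
    constructor
    · intro hm
      rcases List.mem_cons.mp hm with rfl | hm'
      · exact absurd rfl hc
      · rw [hdrop, List.mem_filter]
        exact ⟨hm', by simpa using hc⟩
    · intro hm
      exact List.mem_cons_of_mem _ ((xs.dropWhile_sublist _).mem hm)

theorem dedupKeys_sound : ∀ (t : List Char), t.Pairwise (· ≤ ·) →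
    (∀ c, c ∈ dedupKeys t ↔ c ∈ t) ∧ (dedupKeys t).Nodup := by
  intro t
  induction t using dedupKeys.induct with
  | case1 => intro _; simp [dedupKeys]
  | case2 x xs ih =>
    intro h
    rcases run_facts x xs h with ⟨_, hdrop, hx, _, hmem⟩
    rcases ih hdrop with ⟨ihmem, ihnd⟩
    constructor
    · intro c
      rw [dedupKeys]
      by_cases hc : c = x
      · subst hc; simp
      · constructor
        · intro hm
          rcases List.mem_cons.mp hm with rfl | hm'
          · exact absurd rfl hc
          · exact (hmem c hc).mpr ((ihmem c).mp hm')
        · intro hm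
          exact List.mem_cons_of_mem _ ((ihmem c).mpr ((hmem c hc).mp hm))
    · rw [dedupKeys]
      exact List.nodup_cons.mpr ⟨fun hm => hx ((ihmem x).mp hm), ihnd⟩

theorem bLoop_eq (joker : Bool) : ∀ (fuel : Nat) (t : List Char) (occ : List Int) (jk : Int),
    t.length ≤ fuel → t.Pairwise (· ≤ ·) → bLoop joker fuel t occ jk =
      (occ ++ ((dedupKeys t).filter (fun c => !(joker && c == 'J'))).map (fun c => (t.count c : Int)),
       if joker && decide ('J' ∈ t) then (t.count 'J' : Int) else jk) := by
  intro fuel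
  induction fuel with
  | zero =>
    intro t occ jk hlen _
    cases t with
    | nil => simp [bLoop, dedupKeys]
    | cons x xs => simp at hlen
  | succ fuel ihf =>
    intro t occ jk hlen hp
    cases t with
    | nil => simp [bLoop, dedupKeys]
    | cons x xs =>
      have hlen' : (xs.dropWhile (fun c => c == x)).length ≤ fuel :=
        le_trans (List.length_dropWhile_le _ _) (by simpa using hlen)
      rcases run_facts x xs hp with ⟨hcnt, hdrop, hxmem, hcount, hmemiff⟩
      by_cases hc : (joker && x == 'J') = true
      · obtain ⟨hj, hx'⟩ : joker = true ∧ (x == 'J') = true := by simpa using hc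
        have hx : x = 'J' := by simpa using hx'
        subst hj
        subst hx
        rw [show bLoop true (fuel + 1) ('J' :: xs) occ jk =
            bLoop true fuel (xs.dropWhile (fun c => c == 'J')) occ
              (1 + ((xs.takeWhile (fun c => c == 'J')).length : Int)) from by
          simp [bLoop]]
        rw [ihf _ occ _ hlen' hdrop, dedupKeys]
        refine Prod.ext ?_ ?_
        · show occ ++ _ = occ ++ _
          rw [List.filter_cons_of_neg (by simp)]
          apply congrArg
          apply List.map_congr_left
          intro c hcmem
          have hcd : c ∈ xs.dropWhile (fun c => c == 'J') :=
            mem_dedupKeys _ c (List.mem_filter.mp hcmem).1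
          have hcne : c ≠ 'J' := fun e => hxmem (e ▸ hcd)
          rw [hcount c hcne]
        · have hJout : 'J' ∉ xs.dropWhile (fun c => c == 'J') := hxmem
          show (if (true && decide ('J' ∈ xs.dropWhile (fun c => c == 'J'))) = true then _ else _) = _
          rw [if_neg (by simpa using hJout), if_pos (by simp)]
          rw [hcnt]
          push_cast
          ring
      · rw [show bLoop joker (fuel + 1) (x :: xs) occ jk =
            bLoop joker fuel (xs.dropWhile (fun c => c == x))
              (occ ++ [1 + ((xs.takeWhile (fun c => c == x)).length : Int)]) jk from by
          simp only [bLoop]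
          rw [if_neg hc]]
        rw [ihf _ _ jk hlen' hdrop, dedupKeys]
        have hf : (joker && x == 'J') = false := by
          cases hb : (joker && x == 'J') with
          | false => rfl
          | true => exact absurd hb hc
        have hkeep : (!(joker && x == 'J')) = true := by rw [hf]; rfl
        refine Prod.ext ?_ ?_
        · show occ ++ [_] ++ _ = occ ++ _
          rw [show (List.filter (fun c => !(joker && c == 'J'))
                (x :: dedupKeys (xs.dropWhile (fun c => c == x)))) =
              x :: List.filter (fun c => !(joker && c == 'J'))
                (dedupKeys (xs.dropWhile (fun c => c == x))) from List.filter_cons_of_pos hkeep]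
          rw [List.map_cons, List.append_assoc, List.singleton_append]
          apply congrArg
          refine congrArg₂ _ ?_ ?_
          · show (1 + ((xs.takeWhile (fun c => c == x)).length : Int)) = ((x :: xs).count x : Int)
            rw [hcnt]
            push_cast
            ring
          · apply List.map_congr_left
            intro c hcmem
            have hcd : c ∈ xs.dropWhile (fun c => c == x) :=
              mem_dedupKeys _ c (List.mem_filter.mp hcmem).1
            have hcne : c ≠ x := fun e => hxmem (e ▸ hcd)
            rw [hcount c hcne]
        · by_cases hj : joker = true
          · subst hj
            have hxne : x ≠ 'J' := by
              intro e
              subst e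
              simp at hf
            have hJiff : ('J' ∈ x :: xs) ↔ ('J' ∈ xs.dropWhile (fun c => c == x)) :=
              hmemiff 'J' (fun e => hxne e.symm)
            by_cases hmem : 'J' ∈ xs.dropWhile (fun c => c == x)
            · show (if _ then _ else _) = (if _ then _ else _)
              rw [if_pos (by simpa using hmem), if_pos (by simpa using hJiff.mpr hmem)]
              rw [hcount 'J' (fun e => hxne e.symm)]
            · show (if _ then _ else _) = (if _ then _ else _)
              rw [if_neg (by simpa using hmem), if_neg (by simpa using fun hm => hmem (hJiff.mp hm))]
          · have hjf : joker = false := by simpa using hj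
            subst hjf
            simp

-- a nodup list filtered to a single value
theorem filter_beq_of_nodup : ∀ (s : List Char), s.Nodup → ∀ (a : Char),
    s.filter (fun c => c == a) = if a ∈ s then [a] else [] := by
  intro s
  induction s with
  | nil => intro _ a; simp
  | cons h t ih =>
    intro hnd a
    rcases List.nodup_cons.mp hnd with ⟨hh, ht⟩
    by_cases e : h = a
    · subst e
      rw [List.filter_cons_of_pos (by simp)]
      have htl : t.filter (fun c => c == h) = [] := by
        rw [ih ht h, if_neg hh]
      rw [htl]
      simp
    · rw [List.filter_cons_of_neg (by simpa using e)]
      rw [ih ht a]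
      by_cases hm : a ∈ t
      · simp [hm, List.mem_cons]
      · have hnm : a ∉ h :: t := by
          intro hx
          rcases List.mem_cons.mp hx with e' | h'
          · exact e e'.symm
          · exact hm h'
        simp [hm, hnm]

-- A's loop, split into its two accumulators
theorem aLoop_eq (joker : Bool) (l : List Char) :
    (PySem.Set.ofList l).foldl (fun (st : List Int × Int) card =>
      if joker then
        if card == 'J' then (st.1, st.2 + (PySem.Chars.count l [card] : Int))
        else (st.1 ++ [(PySem.Chars.count l [card] : Int)], st.2)
      else (st.1 ++ [(PySem.Chars.count l [card] : Int)], st.2)) ([], 0) =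
    (((PySem.Set.ofList l).filter (fun c => !(joker && c == 'J'))).map (fun c => (l.count c : Int)),
     if joker && decide ('J' ∈ l) then (l.count 'J' : Int) else 0) := by
  have hstep : (fun (st : List Int × Int) card =>
      if joker then
        if card == 'J' then (st.1, st.2 + (PySem.Chars.count l [card] : Int))
        else (st.1 ++ [(PySem.Chars.count l [card] : Int)], st.2)
      else (st.1 ++ [(PySem.Chars.count l [card] : Int)], st.2)) =
      (fun (st : List Int × Int) card =>
      if joker then
        if card == 'J' then (st.1, st.2 + (l.count card : Int))
        else (st.1 ++ [(l.count card : Int)], st.2)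
      else (st.1 ++ [(l.count card : Int)], st.2)) := by
    funext st card
    rw [chars_count_singleton]
  rw [hstep]
  cases joker with
  | false =>
    simp only [Bool.false_eq_true, if_false, Bool.false_and, Bool.not_false, List.filter_true]
    rw [PySem.List.foldl_prod_mk (f := fun (occ : List Int) card => occ ++ [(l.count card : Int)])
      (g := fun (jk : Int) _ => jk)]
    rw [PySem.List.foldl_append_singleton_eq_map, PySem.List.foldl_ignore]
    simp
  | true =>
    simp only [if_true]
    rw [show (fun (st : List Int × Int) card =>
        if card == 'J' then (st.1, st.2 + (l.count card : Int))
        else (st.1 ++ [(l.count card : Int)], st.2)) =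
        (fun (st : List Int × Int) card =>
        (if !(card == 'J') then st.1 ++ [(l.count card : Int)] else st.1,
         if card == 'J' then st.2 + (l.count card : Int) else st.2)) from by
      funext st card
      by_cases e : card = 'J' <;> simp [e]]
    rw [PySem.List.foldl_prod_mk
      (f := fun (occ : List Int) card => if !(card == 'J') then occ ++ [(l.count card : Int)] else occ)
      (g := fun (jk : Int) card => if card == 'J' then jk + (l.count card : Int) else jk)]
    rw [PySem.List.foldl_append_if, PySem.List.foldl_if_eq_foldl_filter, PySem.List.foldl_add]
    rw [filter_beq_of_nodup _ (PySem.Set.nodup_ofList l) 'J']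
    refine Prod.ext ?_ ?_
    · simp
    · by_cases hm : 'J' ∈ l
      · have hms : 'J' ∈ PySem.Set.ofList l := (PySem.Set.mem_ofList l 'J').mpr hm
        simp [hms, hm]
      · have hms : 'J' ∉ PySem.Set.ofList l := fun hx => hm ((PySem.Set.mem_ofList l 'J').mp hx)
        simp [hms, hm]

-- a descending sort (no key) of a rearrangement is the same list
theorem sorted_rev_eq_of_perm (xs ys : List Int) (h : xs.Perm ys) :
    PySem.List.sorted xs (fun x => x) true = PySem.List.sorted ys (fun x => x) true := by
  refine PySem.List.eq_of_perm_of_pairwise_le_of_injective (key := fun x : Int => -x)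
    (fun a b e => by simpa using e) ?_ ?_ ?_
  · exact (PySem.List.sorted_perm xs _ true).trans (h.trans (PySem.List.sorted_perm ys _ true).symm)
  · exact (PySem.List.sorted_pairwise_rev xs (fun x : Int => x)).imp (by intro a b hb; simpa using hb)
  · exact (PySem.List.sorted_pairwise_rev ys (fun x : Int => x)).imp (by intro a b hb; simpa using hb)

-- the shared epilogue of the two programs: occ[0] += jokers / occ = [jokers]
theorem finish_eq (joker : Bool) (S : List Int) (J : Int) :
    (if joker then (if S.length > 0 then (S.headD 0 + J) :: S.tail else [J]) else S) =
    (if joker then (if S.isEmpty then [J] else (S.headD 0 + J) :: S.tail) else S) := by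
  cases joker with
  | false => simp
  | true => cases S <;> simp

-- ===== VERDICT (by name: the statement is the Claim_ definition above) =====
theorem cardOccur_spec : Claim_equal_cardOccur := by
  intro hand joker _
  show cardOccur hand joker = cardOccur_alt hand joker
  rw [cardOccur, cardOccur_alt]
  have hsort : (PySem.List.sorted hand.toList (fun x => x) false).Pairwise (· ≤ ·) :=
    PySem.List.sorted_pairwise hand.toList (fun x => x)
  rw [aLoop_eq, bLoop_eq joker _ _ [] 0 le_rfl hsort]
  have hperm : (PySem.List.sorted hand.toList (fun x => x) false).Perm hand.toList :=
    PySem.List.sorted_perm hand.toList (fun x => x) false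
  have hcnt : (fun c => ((PySem.List.sorted hand.toList (fun x => x) false).count c : Int)) =
      (fun c => (hand.toList.count c : Int)) := by
    funext c
    rw [hperm.count_eq]
  have hmem : ∀ c, (c ∈ PySem.List.sorted hand.toList (fun x => x) false) ↔ c ∈ hand.toList :=
    fun c => hperm.mem_iff
  have hdk : (dedupKeys (PySem.List.sorted hand.toList (fun x => x) false)).Perm
      (PySem.Set.ofList hand.toList) := by
    refine (List.perm_ext_iff_of_nodup (dedupKeys_sound _ hsort).2 (PySem.Set.nodup_ofList _)).mpr ?_
    intro c
    rw [(dedupKeys_sound _ hsort).1 c, hmem c, PySem.Set.mem_ofList]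
  have hocc : ((dedupKeys (PySem.List.sorted hand.toList (fun x => x) false)).filter
        (fun c => !(joker && c == 'J'))).map
        (fun c => ((PySem.List.sorted hand.toList (fun x => x) false).count c : Int)) |>.Perm
      (((PySem.Set.ofList hand.toList).filter (fun c => !(joker && c == 'J'))).map
        (fun c => (hand.toList.count c : Int))) := by
    rw [hcnt]
    exact (hdk.filter _).map _
  have hsorteq := sorted_rev_eq_of_perm _ _ hocc.symm
  have hjk : (if joker && decide ('J' ∈ PySem.List.sorted hand.toList (fun x => x) false)
        then ((PySem.List.sorted hand.toList (fun x => x) false).count 'J' : Int) else (0 : Int)) =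
      (if joker && decide ('J' ∈ hand.toList) then (hand.toList.count 'J' : Int) else 0) := by
    rw [hperm.count_eq]
    congr 2
    simp [hmem 'J']
  simp only [List.nil_append]
  rw [hsorteq, hjk]
  exact finish_eq joker _ _
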